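-- pv_equiv track=rewrite | github.com/sangwu99/Programmers | Level1/부족한 금액 계산하기.py | solution
-- ===== SOURCE A (Python) =====
-- def solution(price, money, count):
--     total = 0
--     if count!=1:
--         for i in range(1,count+1):
--             total += price*i
--     else:
--         total = price
--     if (total - money) <0:
--         answer = 0
--     else:
--         answer = total - money
--     return answer
-- ===== SOURCE B (Python) =====
-- def solution(price, money, count):
--     c = count if count > 0 else 0
--     return max(price * c * (c + 1) // 2 - money, 0)
-- ===== Notes on version B (the rewrite author's own statement) =====
-- stated objective: faster
-- what changed: Replaces the O(count) summation loop by the closed-form arithmetic-series formula price*count*(count+1)//2 and a max() clamp.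
import Mathlib
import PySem

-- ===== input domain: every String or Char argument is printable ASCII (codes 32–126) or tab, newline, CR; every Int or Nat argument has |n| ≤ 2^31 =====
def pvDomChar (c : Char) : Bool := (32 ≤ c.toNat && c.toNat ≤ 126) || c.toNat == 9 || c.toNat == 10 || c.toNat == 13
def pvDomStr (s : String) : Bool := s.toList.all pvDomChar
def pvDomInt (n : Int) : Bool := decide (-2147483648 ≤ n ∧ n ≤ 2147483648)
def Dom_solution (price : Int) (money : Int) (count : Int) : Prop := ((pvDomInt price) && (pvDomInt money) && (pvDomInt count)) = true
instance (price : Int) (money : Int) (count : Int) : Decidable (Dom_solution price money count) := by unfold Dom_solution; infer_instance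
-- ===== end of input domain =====

-- B replaces A's O(count) summation loop by the closed-form arithmetic series (O(1)); objective: faster.

-- ===== PORT A =====
def solution (price : Int) (money : Int) (count : Int) : Int :=
  let total : Int :=
    if count ≠ 1 then
      (PySem.List.pyRange 1 (count + 1) 1).foldl (fun total i => total + price * i) 0
    else price
  if total - money < 0 then 0 else total - money

-- ===== PORT B =====
def solution_alt (price : Int) (money : Int) (count : Int) : Int :=
  let c : Int := if count > 0 then count else 0
  max (PySem.Int.floordiv (price * c * (c + 1)) 2 - money) 0

-- ===== PRECONDITION & SPEC =====
def Spec_solution (price : Int) (money : Int) (count : Int) (out : Int) : Prop := out = solution_alt price money count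
instance (price : Int) (money : Int) (count : Int) (out : Int) : Decidable (Spec_solution price money count out) := by unfold Spec_solution; infer_instance

-- ===== CLAIM (what is proved, stated in full; the proofs are below) =====
def Claim_equal_solution : Prop := ∀ (price : Int) (money : Int) (count : Int), Dom_solution price money count → Spec_solution price money count (solution price money count)

-- ===== LEMMAS AND PROOFS =====

-- A's loop, doubled, equals the arithmetic series price*n*(n+1).
lemma series_loop (price : Int) : ∀ n : Nat,
    (PySem.List.pyRange 1 ((n : Int) + 1) 1).foldl (fun total i => total + price * i) 0 * 2
      = price * n * (n + 1) := by
  intro n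
  induction n with
  | zero => simp [PySem.List.pyRange_one_eq_nil]
  | succ m ih =>
    have h : PySem.List.pyRange 1 ((m : Int) + 1 + 1) 1
        = PySem.List.pyRange 1 ((m : Int) + 1) 1 ++ [(m : Int) + 1] := by
      exact PySem.List.pyRange_one_succ_right (by omega)
    push_cast
    rw [show ((m : Int) + 1 + 1) = ((m : Int) + 1) + 1 from rfl, h, List.foldl_append]
    simp only [List.foldl]
    ring_nf
    ring_nf at ih
    linarith

theorem solution_spec : Claim_equal_solution := by
  intro price money count _
  unfold Spec_solution solution solution_alt
  by_cases hpos : count > 0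
  · -- total (for both branches of A) = price*count*(count+1)/2
    obtain ⟨n, rfl⟩ : ∃ n : Nat, count = (n : Int) := ⟨count.toNat, by omega⟩
    simp only [if_pos hpos]
    have hser := series_loop price n
    have hfd : PySem.Int.floordiv (price * (n : Int) * ((n : Int) + 1)) 2
        = (PySem.List.pyRange 1 ((n : Int) + 1) 1).foldl (fun total i => total + price * i) 0 := by
      rw [PySem.Int.floordiv_eq_ediv_of_pos (by omega), ← hser]
      omega
    by_cases h1 : (n : Int) = 1
    · simp only [h1] at hser hfd ⊢
      rw [hfd, if_neg (by norm_num : ¬ ((1:Int) ≠ 1))]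
      split_ifs <;> omega
    · simp only [if_pos h1]
      rw [hfd]; omega
  · -- count ≤ 0 : A's loop is empty, B clamps c to 0
    have hle : count + 1 ≤ 1 := by omega
    have hnil : PySem.List.pyRange 1 (count + 1) 1 = [] :=
      PySem.List.pyRange_one_eq_nil hle
    have hne : count ≠ 1 := by omega
    rw [if_neg hpos]
    simp only [if_pos hne, hnil, List.foldl_nil]
    have : PySem.Int.floordiv (price * (0:Int) * ((0:Int) + 1)) 2 = 0 := by
      rw [PySem.Int.floordiv_eq_ediv_of_pos (by omega)]; norm_num
    rw [this]; omega
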